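-- pv_equiv track=rewrite | github.com/graphsignal/solver-demo | solutions/1011-B.py | maximum_days
-- ===== SOURCE A (Python) =====
-- def maximum_days(n, m, a):
--     # Count the frequency of each food type
--     food_count = {}
--     for food_type in a:
--         if food_type in food_count:
--             food_count[food_type] += 1
--         else:
--             food_count[food_type] = 1
--
--     # Binary search for the maximum possible number of days
--     left, right = 0, m // n
--
--     # Function to check feasibility for d days
--     def can_feed_for_days(d):
--         total_possible_participants = 0
--         for count in food_count.values():
--             total_possible_participants += count // d
--         return total_possible_participants >= n
--
--     while left < right:
--         mid = (left + right + 1) // 2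
--         if can_feed_for_days(mid):
--             left = mid
--         else:
--             right = mid - 1
--
--     return left
-- ===== SOURCE B (Python) =====
-- def maximum_days(n, m, a):
--     counts = {}
--     for x in a:
--         counts[x] = counts.get(x, 0) + 1
--
--     # no food type can feed one participant for more than its count days
--     mx = 0
--     for c in counts.values():
--         if mx < c:
--             mx = c
--
--     # scan candidate day counts from the highest possible downwards
--     d = min(m // n, mx)
--     while d >= 1:
--         if sum(c // d for c in counts.values()) >= n:
--             return d
--         d -= 1
--     return 0
-- ===== Notes on version B (the rewrite author's own statement) =====
-- stated objective: simpler
-- what changed: Replaces the binary search over [0, m//n] by a direct downward linear scan that starts at min(m//n, max count) (no food type can feed anyone longer than its own count) and returns the first feasible day count.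
-- outside the precondition, e.g. on maximum_days(-1, -5, []): A returns 5, B returns 0; on maximum_days(0, 5, [1]): A raises ZeroDivisionError, B raises ZeroDivisionError
import Mathlib
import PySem

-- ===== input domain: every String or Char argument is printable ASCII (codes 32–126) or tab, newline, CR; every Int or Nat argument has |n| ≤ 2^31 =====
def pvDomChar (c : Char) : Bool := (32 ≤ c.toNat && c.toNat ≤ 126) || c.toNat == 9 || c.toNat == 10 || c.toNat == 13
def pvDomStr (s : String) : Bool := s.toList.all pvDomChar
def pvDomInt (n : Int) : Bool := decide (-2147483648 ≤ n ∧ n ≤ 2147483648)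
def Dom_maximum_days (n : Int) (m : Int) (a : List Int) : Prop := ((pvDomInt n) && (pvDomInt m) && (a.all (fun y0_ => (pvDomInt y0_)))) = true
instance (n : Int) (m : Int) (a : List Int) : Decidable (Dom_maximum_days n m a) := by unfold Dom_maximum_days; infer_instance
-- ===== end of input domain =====

-- B replaces A's binary search over [0, m//n] by a downward linear scan starting at
-- min(m//n, max count) — same counts, simpler control flow; not claimed faster.

-- ===== PORT A =====
-- can_feed_for_days(d): sum over the counter's values of count // d, compared with n
def pyCanFeed (n : Int) (fc : PySem.Dict Int Int) (d : Int) : Bool :=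
  decide (n ≤ fc.values.foldl (fun acc c => acc + PySem.Int.floordiv c d) 0)

-- midpoint bounds cited by pyBinSearch's decreasing_by
theorem pyMid_bounds {left right : Int} (h : left < right) :
    left + 1 ≤ PySem.Int.floordiv (left + right + 1) 2 ∧
      PySem.Int.floordiv (left + right + 1) 2 ≤ right := by
  have hb := PySem.Int.floordiv_two_mid_bounds (lo := left + 1) (hi := right) (by omega)
  have e : left + 1 + right = left + right + 1 := by ring
  rw [e] at hb
  exact hb

-- the while-loop of A: left, right with mid = (left + right + 1) // 2
def pyBinSearch (n : Int) (fc : PySem.Dict Int Int) (left right : Int) : Int :=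
  if h : left < right then
    let mid := PySem.Int.floordiv (left + right + 1) 2
    if pyCanFeed n fc mid then pyBinSearch n fc mid right
    else pyBinSearch n fc left (mid - 1)
  else left
termination_by (right - left).toNat
decreasing_by
  · have hb := pyMid_bounds h; omega
  · have hb := pyMid_bounds h; omega

def maximum_days (n : Int) (m : Int) (a : List Int) : Int :=
  let food_count := a.foldl
    (fun fc x => if fc.contains x then fc.insert x (fc.getD x 0 + 1) else fc.insert x 1)
    PySem.Dict.empty
  pyBinSearch n food_count 0 (PySem.Int.floordiv m n)

-- ===== PORT B =====
-- sum(c // d for c in counts.values()) >= n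
def altFeasible (n : Int) (fc : PySem.Dict Int Int) (d : Int) : Bool :=
  decide (n ≤ (fc.values.map (fun c => PySem.Int.floordiv c d)).sum)

-- the while-loop of B: d, d-1, … until feasible or d < 1
def altScan (n : Int) (fc : PySem.Dict Int Int) (d : Int) : Int :=
  if h : 1 ≤ d then
    (if altFeasible n fc d then d else altScan n fc (d - 1))
  else 0
termination_by d.toNat
decreasing_by omega

def maximum_days_alt (n : Int) (m : Int) (a : List Int) : Int :=
  let counts := a.foldl (fun fc x => fc.insert x (fc.getD x 0 + 1)) PySem.Dict.empty
  let mx := counts.values.foldl (fun mx c => if mx < c then c else mx) 0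
  altScan n counts (min (PySem.Int.floordiv m n) mx)

-- ===== PRECONDITION & SPEC =====
-- Pre_ restricts to the natural domain of at least one participant: n = 0 makes A raise
-- ZeroDivisionError, and for n < 0 the feasibility test is vacuously true, so A's value
-- m//n on a meaningless input is an accident of the search bounds that no one would specify.
def Pre_maximum_days (n : Int) (m : Int) (a : List Int) : Prop := 1 ≤ n
instance (n : Int) (m : Int) (a : List Int) : Decidable (Pre_maximum_days n m a) := by
  unfold Pre_maximum_days; infer_instance

def pvWitness_maximum_days : Int × Int × List Int := (2, 10, [1, 1, 2])

def Spec_maximum_days (n : Int) (m : Int) (a : List Int) (out : Int) : Prop := out = maximum_days_alt n m a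
instance (n : Int) (m : Int) (a : List Int) (out : Int) : Decidable (Spec_maximum_days n m a out) := by unfold Spec_maximum_days; infer_instance

-- ===== CLAIM (what is proved, stated in full; the proofs are below) =====
def Claim_equal_maximum_days : Prop := ∀ (n : Int) (m : Int) (a : List Int), Dom_maximum_days n m a → Pre_maximum_days n m a → Spec_maximum_days n m a (maximum_days n m a)

-- ===== LEMMAS AND PROOFS =====

theorem floordiv_anti {c d e : Int} (hc : 0 ≤ c) (hd : 1 ≤ d) (hde : d ≤ e) :
    PySem.Int.floordiv c e ≤ PySem.Int.floordiv c d := by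
  have he : (0:Int) < e := by omega
  have hq0 : 0 ≤ PySem.Int.floordiv c e := by
    rw [PySem.Int.floordiv_eq_ediv_of_pos he]
    exact Int.ediv_nonneg hc (by omega)
  have h1 : PySem.Int.floordiv c e * e ≤ c :=
    (PySem.Int.le_floordiv_iff_mul_le he).1 le_rfl
  have h2 : PySem.Int.floordiv c e * d ≤ c :=
    le_trans (mul_le_mul_of_nonneg_left hde hq0) h1
  exact (PySem.Int.le_floordiv_iff_mul_le (by omega)).2 h2

theorem altFeasible_anti {n : Int} {fc : PySem.Dict Int Int}
    (hpos : ∀ c ∈ fc.values, (0:Int) ≤ c) {d e : Int} (hd : 1 ≤ d) (hde : d ≤ e)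
    (h : altFeasible n fc e = true) : altFeasible n fc d = true := by
  simp only [altFeasible, decide_eq_true_eq] at h ⊢
  refine le_trans h (List.sum_le_sum ?_)
  intro c hc
  exact floordiv_anti (hpos c hc) hd hde

theorem altFeasible_le_max {n : Int} {fc : PySem.Dict Int Int} {mx d : Int}
    (hmx : ∀ c ∈ fc.values, c ≤ mx) (hn : 1 ≤ n) (hd : 1 ≤ d)
    (h : altFeasible n fc d = true) : d ≤ mx := by
  by_contra hgt
  push_neg at hgt
  simp only [altFeasible, decide_eq_true_eq] at h
  have hsum : (fc.values.map (fun c => PySem.Int.floordiv c d)).sum ≤ 0 := by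
    have hle : (fc.values.map (fun c => PySem.Int.floordiv c d)).sum ≤
        (fc.values.map (fun _ => (0:Int))).sum := by
      refine List.sum_le_sum ?_
      intro c hc
      have hcd : c < d := lt_of_le_of_lt (hmx c hc) hgt
      have hlt1 : PySem.Int.floordiv c d < 1 := by
        rw [PySem.Int.floordiv_lt_iff_lt_mul (by omega)]
        omega
      omega
    simpa using hle
  omega

-- pyCanFeed and altFeasible compute the same test
theorem canFeed_eq_altFeasible (n : Int) (fc : PySem.Dict Int Int) (d : Int) :
    pyCanFeed n fc d = altFeasible n fc d := by
  simp only [pyCanFeed, altFeasible, PySem.List.foldl_add, zero_add]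

theorem altScan_of_nonpos (n : Int) (fc : PySem.Dict Int Int) {d : Int} (hd : d ≤ 0) :
    altScan n fc d = 0 := by
  rw [altScan]
  simp [show ¬ (1:Int) ≤ d by omega]

-- the scan does not change while it crosses an infeasible stretch
theorem altScan_stable (n : Int) (fc : PySem.Dict Int Int) :
    ∀ (k : Nat) (r t : Int), (r - t).toNat = k → t ≤ r →
      (∀ e, t < e → e ≤ r → altFeasible n fc e = false) →
      altScan n fc r = altScan n fc t := by
  intro k
  induction k with
  | zero =>
    intro r t hk htr _
    have : r = t := by omega
    rw [this]
  | succ k ih =>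
    intro r t hk htr hno
    have hlt : t < r := by omega
    by_cases h1 : (1:Int) ≤ r
    · have hPr : altFeasible n fc r = false := hno r hlt le_rfl
      rw [altScan]
      simp only [h1, dif_pos, hPr, Bool.false_eq_true, if_false]
      exact ih (r - 1) t (by omega) (by omega) (fun e he1 he2 => hno e he1 (by omega))
    · rw [altScan_of_nonpos n fc (by omega : r ≤ 0), altScan_of_nonpos n fc (by omega : t ≤ 0)]

theorem altScan_stable' (n : Int) (fc : PySem.Dict Int Int) (r t : Int) (htr : t ≤ r)
    (hno : ∀ e, t < e → e ≤ r → altFeasible n fc e = false) :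
    altScan n fc r = altScan n fc t :=
  altScan_stable n fc (r - t).toNat r t rfl htr hno

-- A's binary search returns what B's downward scan from the right end returns
theorem pyBinSearch_eq_altScan (n : Int) (fc : PySem.Dict Int Int)
    (hpos : ∀ c ∈ fc.values, (0:Int) ≤ c) :
    ∀ (k : Nat) (l r : Int), (r - l).toNat = k → 0 ≤ l → l ≤ r →
      (l = 0 ∨ (1 ≤ l ∧ altFeasible n fc l = true)) →
      pyBinSearch n fc l r = altScan n fc r := by
  intro k
  induction k using Nat.strong_induction_on with
  | _ k ih =>
    intro l r hk hl0 hlr hinv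
    by_cases hlt : l < r
    · have hb := pyMid_bounds hlt
      rw [pyBinSearch]
      simp only [hlt, dif_pos]
      rw [canFeed_eq_altFeasible]
      by_cases hP : altFeasible n fc (PySem.Int.floordiv (l + r + 1) 2) = true
      · rw [hP]
        simp only [if_true]
        exact ih ((r - PySem.Int.floordiv (l + r + 1) 2).toNat) (by omega) _ r rfl
          (by omega) (by omega) (Or.inr ⟨by omega, hP⟩)
      · have hPf : altFeasible n fc (PySem.Int.floordiv (l + r + 1) 2) = false :=
          Bool.eq_false_iff.mpr hP
        rw [hPf]
        simp only [Bool.false_eq_true, if_false]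
        have hrec := ih ((PySem.Int.floordiv (l + r + 1) 2 - 1 - l).toNat) (by omega)
          l (PySem.Int.floordiv (l + r + 1) 2 - 1) rfl hl0 (by omega) hinv
        rw [hrec]
        refine (altScan_stable' n fc r (PySem.Int.floordiv (l + r + 1) 2 - 1) (by omega) ?_).symm
        intro e he1 he2
        cases hE : altFeasible n fc e with
        | false => rfl
        | true =>
          have := altFeasible_anti hpos (d := PySem.Int.floordiv (l + r + 1) 2)
            (by omega) (by omega) hE
          rw [hPf] at this
          exact absurd this (by simp)
    · have : l = r := by omega
      subst this
      rw [pyBinSearch]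
      simp only [hlt, dif_neg, not_false_iff]
      rcases hinv with h0 | ⟨h1, hP⟩
      · subst h0
        rw [altScan]
        simp
      · rw [altScan]
        simp [h1, hP]

-- A's counter-building loop equals B's
theorem foldFun_eq :
    (fun (fc : PySem.Dict Int Int) (x : Int) =>
        if fc.contains x then fc.insert x (fc.getD x 0 + 1) else fc.insert x 1) =
      (fun fc x => fc.insert x (fc.getD x 0 + 1)) := by
  funext fc x
  by_cases h : fc.contains x
  · simp [h]
  · have hf : fc.contains x = false := Bool.eq_false_iff.mpr h
    rw [if_neg (by simp [hf]), PySem.Dict.getD_of_not_contains fc 0 hf]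
    norm_num

-- B's running-maximum loop is a fold of max
theorem maxFun_eq :
    (fun (mx c : Int) => if mx < c then c else mx) = (max : Int → Int → Int) := by
  funext x y
  simp only [max_def]
  split_ifs <;> omega

theorem maximum_days_spec : Claim_equal_maximum_days := by
  unfold Claim_equal_maximum_days
  intro n m a _ hpre
  unfold Pre_maximum_days at hpre
  unfold Spec_maximum_days
  simp only [maximum_days, maximum_days_alt]
  rw [foldFun_eq, maxFun_eq, PySem.Dict.foldl_insert_getD_add_one_eq_counter]
  have hpos : ∀ c ∈ (PySem.Dict.counter a).values, (0:Int) ≤ c := by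
    intro c hc
    have hvals : (PySem.Dict.counter a).values
        = (PySem.Set.ofList a).map (fun k => ((a.count k : Int))) := by
      simp [PySem.Dict.values, PySem.Dict.items_counter, List.map_map, Function.comp]
    rw [hvals] at hc
    obtain ⟨k, -, rfl⟩ := List.mem_map.mp hc
    exact Int.natCast_nonneg _
  have hmax := PySem.List.le_foldl_max (PySem.Dict.counter a).values (0 : Int)
  have hMX0 : (0:Int) ≤ (PySem.Dict.counter a).values.foldl max 0 := hmax.1
  by_cases hR0 : 0 ≤ PySem.Int.floordiv m n
  · rw [pyBinSearch_eq_altScan n _ hpos (PySem.Int.floordiv m n - 0).toNat 0 _ rfl le_rfl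
      hR0 (Or.inl rfl)]
    refine altScan_stable' n _ _ _ (min_le_left _ _) ?_
    intro e he1 he2
    cases hE : altFeasible n (PySem.Dict.counter a) e with
    | false => rfl
    | true =>
      have heMX := altFeasible_le_max hmax.2 hpre (by omega) hE
      omega
  · rw [min_eq_left (by omega :
      PySem.Int.floordiv m n ≤ (PySem.Dict.counter a).values.foldl max 0)]
    rw [pyBinSearch, altScan_of_nonpos n _ (by omega : PySem.Int.floordiv m n ≤ 0)]
    simp [show ¬ (0:Int) < PySem.Int.floordiv m n by omega]
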